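-- pv_equiv track=rewrite | github.com/outaouss/Python_Modules_1337 | python_05/ex1/data_stream.py | process_batch
-- ===== SOURCE A (Python) =====
-- from typing import Any, List, Dict, Union, Optional
--
-- def process_batch(data_batch: List[Any]) -> str:
--     if not data_batch:
--         return "No Data To Process"
--
--     try:
--         count = len(data_batch)
--         detect = 0
--         for check in data_batch:
--             if type(check) is not str:
--                 return "Error: The Data is Not A Text"
--             if "error" in check.lower():
--                 detect += 1
--         return f"Event analysis: {count} events, {detect} error detected"
--     except Exception:
--         return "Error: While Parsing The Data !"
-- ===== SOURCE B (Python) =====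
-- def _scan(items):
--     # divide-and-conquer: returns None on the first non-str, else the error count
--     if not items:
--         return 0
--     if len(items) == 1:
--         x = items[0]
--         if type(x) is not str:
--             return None
--         return 1 if "error" in x.lower() else 0
--     mid = len(items) // 2
--     left = _scan(items[:mid])
--     if left is None:
--         return None
--     right = _scan(items[mid:])
--     if right is None:
--         return None
--     return left + right
--
--
-- def process_batch(data_batch):
--     if not data_batch:
--         return "No Data To Process"
--     try:
--         detect = _scan(data_batch)
--         if detect is None:
--             return "Error: The Data is Not A Text"
--         return f"Event analysis: {len(data_batch)} events, {detect} error detected"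
--     except Exception:
--         return "Error: While Parsing The Data !"
-- ===== Notes on version B (the rewrite author's own statement) =====
-- stated objective: alternative
-- what changed: Replaces A's single linear loop with mutable counters by a divide-and-conquer recursion that splits the batch in halves and combines the two error counts (None propagated on the first non-string), correct because addition of the half counts is associative.
import Mathlib
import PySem

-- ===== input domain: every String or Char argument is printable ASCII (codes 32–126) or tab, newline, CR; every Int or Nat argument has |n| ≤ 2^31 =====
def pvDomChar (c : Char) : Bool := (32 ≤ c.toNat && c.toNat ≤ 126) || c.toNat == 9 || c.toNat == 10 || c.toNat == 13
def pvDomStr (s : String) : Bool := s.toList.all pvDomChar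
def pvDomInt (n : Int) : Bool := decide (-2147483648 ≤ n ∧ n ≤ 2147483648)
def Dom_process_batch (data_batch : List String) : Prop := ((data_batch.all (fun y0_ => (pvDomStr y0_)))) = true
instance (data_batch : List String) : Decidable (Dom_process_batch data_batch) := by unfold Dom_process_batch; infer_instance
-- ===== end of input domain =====

-- B replaces A's single linear loop by a divide-and-conquer recursion over list halves (alternative decomposition, same cost).
-- In Lean the input is List String, so A's `type(check) is not str` branch and B's None propagation are vacuous and are not ported.

-- ===== PORT A =====
-- A: one loop over the batch maintaining a mutable counter
def process_batch (data_batch : List String) : String :=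
  if data_batch.isEmpty then "No Data To Process"
  else
    let count : Int := (data_batch.length : Int)
    let detect : Int := data_batch.foldl
      (fun d check => if PySem.Str.isIn "error" (PySem.Str.lower check) then d + 1 else d) 0
    "Event analysis: " ++ PySem.Int.toStr count ++ " events, " ++ PySem.Int.toStr detect ++ " error detected"

-- ===== PORT B =====
-- B's _scan: split in halves, count each half, add (the non-str/None path cannot occur on List String)
def pvScanB : List String → Int
  | [] => 0
  | [x] => if PySem.Str.isIn "error" (PySem.Str.lower x) then 1 else 0
  | a :: b :: rest =>
      let l := a :: b :: rest
      pvScanB (l.take (l.length / 2)) + pvScanB (l.drop (l.length / 2))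
termination_by l => l.length
decreasing_by
  · simp; omega
  · simp; omega

def process_batch_alt (data_batch : List String) : String :=
  if data_batch.isEmpty then "No Data To Process"
  else
    let detect : Int := pvScanB data_batch
    "Event analysis: " ++ PySem.Int.toStr (data_batch.length : Int) ++ " events, " ++ PySem.Int.toStr detect ++ " error detected"

-- ===== PRECONDITION & SPEC =====
def Spec_process_batch (data_batch : List String) (out : String) : Prop := out = process_batch_alt data_batch
instance (data_batch : List String) (out : String) : Decidable (Spec_process_batch data_batch out) := by unfold Spec_process_batch; infer_instance

-- ===== CLAIM (what is proved, stated in full; the proofs are below) =====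
def Claim_equal_process_batch : Prop := ∀ (data_batch : List String), Dom_process_batch data_batch → Spec_process_batch data_batch (process_batch data_batch)

-- ===== LEMMAS AND PROOFS =====
-- bridge: the unfolded Chars-level condition in pvScanB's equations is the Str-level predicate
theorem pvIsIn_bridge (x : String) :
    PySem.Chars.isIn ['e','r','r','o','r'] (PySem.Chars.lower x.toList)
      = PySem.Str.isIn "error" (PySem.Str.lower x) := by
  simp [PySem.Str.isIn]

-- The divide-and-conquer count equals the linear countP: halves recombine via countP_append.
theorem pvScanB_eq_countP (l : List String) :
    pvScanB l = ((l.countP (fun x => PySem.Str.isIn "error" (PySem.Str.lower x)) : Nat) : Int) := by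
  fun_induction pvScanB l with
  | case1 => simp [List.countP]
  | case2 x h =>
      simp [List.countP_cons]
      rw [pvIsIn_bridge]
      exact h
  | case3 x h =>
      simp only [Bool.not_eq_true] at h
      simp [List.countP_cons]
      rw [pvIsIn_bridge]
      exact h
  | case4 a b rest l ih1 ih2 =>
      rw [ih1, ih2]
      have h2 : List.take (l.length / 2) l ++ List.drop (l.length / 2) l = a :: b :: rest :=
        List.take_append_drop _ _
      rw [← h2, List.countP_append]
      push_cast; ring

-- ===== VERDICT (by name: the statement is the Claim_ definition above) =====
theorem process_batch_spec : Claim_equal_process_batch := by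
  intro db _
  unfold Spec_process_batch process_batch process_batch_alt
  by_cases h : db.isEmpty
  · simp [h]
  · simp only [h]
    rw [PySem.List.foldl_if_add_one, pvScanB_eq_countP]
    norm_num
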